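-- pv_equiv track=rewrite | github.com/Bucalife/ML_Tutorials-Learnings | Python_mit_60001/ps5/ps5.py | valid_phrase
-- ===== SOURCE A (Python) =====
-- import string
--
-- def valid_phrase(txt):
--
--     punt_c = 0
--
--     for i in string.punctuation + ' ':
--         if i in txt:
--             punt_c += 1
--
--     if punt_c >= 2:
--         return False
--
--     return True
-- ===== SOURCE B (Python) =====
-- import string
--
-- def valid_phrase(txt):
--     punct = set(string.punctuation + ' ')
--     seen = set()
--     for ch in txt:
--         if ch in punct:
--             seen.add(ch)
--             if len(seen) >= 2:
--                 return False
--     return True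
-- ===== Notes on version B (the rewrite author's own statement) =====
-- stated objective: faster
-- what changed: Instead of scanning txt once per each of the 33 punctuation/space characters (a 'c in txt' scan per alphabet character), B makes a single pass over txt maintaining a set of distinct punctuation/space characters seen, returning False as soon as the second distinct one appears.
import Mathlib
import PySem

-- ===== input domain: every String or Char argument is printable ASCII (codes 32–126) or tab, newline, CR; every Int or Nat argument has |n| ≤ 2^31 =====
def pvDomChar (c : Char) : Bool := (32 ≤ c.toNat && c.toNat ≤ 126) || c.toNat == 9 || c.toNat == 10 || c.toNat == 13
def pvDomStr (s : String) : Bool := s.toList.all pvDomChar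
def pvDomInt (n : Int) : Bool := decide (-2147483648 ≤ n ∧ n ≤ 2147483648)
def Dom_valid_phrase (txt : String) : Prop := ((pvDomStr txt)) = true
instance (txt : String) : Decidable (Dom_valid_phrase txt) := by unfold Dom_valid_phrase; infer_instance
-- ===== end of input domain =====

-- B makes a single pass over txt with a seen-set and early exit, instead of A's one 'in txt' scan per punctuation/space character.

-- ===== PORT A =====
-- string.punctuation + ' '
def punctSpaceA : List Char := "!\"#$%&'()*+,-./:;<=>?@[\\]^_`{|}~ ".toList

def valid_phrase (txt : String) : Bool :=
  let punt_c : Int :=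
    punctSpaceA.foldl (fun acc i => if txt.toList.contains i then acc + 1 else acc) 0
  if 2 ≤ punt_c then false else true

-- ===== PORT B =====
-- punct = set(string.punctuation + ' ')
def punctSpaceB : PySem.Set Char := PySem.Set.ofList ("!\"#$%&'()*+,-./:;<=>?@[\\]^_`{|}~ ".toList)

-- the for-loop over txt's characters, with early return False
def bLoop (l : List Char) (seen : PySem.Set Char) : Bool :=
  match l with
  | [] => true
  | c :: rest =>
    if PySem.Set.contains punctSpaceB c then
      let s := PySem.Set.add seen c
      if 2 ≤ s.length then false else bLoop rest s
    else bLoop rest seen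

def valid_phrase_alt (txt : String) : Bool := bLoop txt.toList PySem.Set.empty

-- ===== PRECONDITION & SPEC =====
def Spec_valid_phrase (txt : String) (out : Bool) : Prop := out = valid_phrase_alt txt
instance (txt : String) (out : Bool) : Decidable (Spec_valid_phrase txt out) := by unfold Spec_valid_phrase; infer_instance

-- ===== CLAIM (what is proved, stated in full; the proofs are below) =====
def Claim_equal_valid_phrase : Prop := ∀ (txt : String), Dom_valid_phrase txt → Spec_valid_phrase txt (valid_phrase txt)

-- ===== LEMMAS AND PROOFS =====

-- the set of distinct punctuation/space characters occurring in l
def punctSet (l : List Char) : Finset Char :=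
  (l.filter (fun c => PySem.Set.contains punctSpaceB c)).toFinset

lemma punctSet_nil : punctSet [] = ∅ := rfl

lemma punctSet_cons_pos {c : Char} (rest : List Char)
    (hc : PySem.Set.contains punctSpaceB c = true) :
    punctSet (c :: rest) = insert c (punctSet rest) := by
  unfold punctSet
  rw [List.filter_cons_of_pos hc, List.toFinset_cons]

lemma punctSet_cons_neg {c : Char} (rest : List Char)
    (hc : ¬ PySem.Set.contains punctSpaceB c = true) :
    punctSet (c :: rest) = punctSet rest := by
  unfold punctSet
  rw [List.filter_cons_of_neg hc]

-- A's loop counts the punctuation characters occurring in the text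
lemma countA (p : List Char) (l : List Char) (acc : Int) :
    p.foldl (fun acc i => if l.contains i then acc + 1 else acc) acc
      = acc + ((p.filter (fun i => l.contains i)).length : Int) := by
  induction p generalizing acc with
  | nil => simp
  | cons h t ih =>
    rw [List.foldl_cons, List.filter_cons]
    by_cases hm : l.contains h
    · rw [if_pos hm, if_pos hm, ih]
      rw [List.length_cons]
      push_cast
      ring
    · rw [if_neg hm, if_neg hm, ih]

lemma punctB_eq : punctSpaceB = punctSpaceA := by decide

lemma punctA_nodup : punctSpaceA.Nodup := by decide

-- B's loop returns true iff seen together with the distinct punctuation chars of l stays below 2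
lemma bLoop_eq (l : List Char) (seen : PySem.Set Char) (hnd : seen.Nodup)
    (hle : seen.length ≤ 1) :
    bLoop l seen = decide ((seen.toFinset ∪ punctSet l).card < 2) := by
  induction l generalizing seen with
  | nil =>
    have h1 : seen.toFinset.card ≤ seen.length := List.toFinset_card_le seen
    have : (seen.toFinset ∪ punctSet []).card < 2 := by
      rw [punctSet_nil, Finset.union_empty]; omega
    simp [bLoop, this]
  | cons c rest ih =>
    by_cases hc : PySem.Set.contains punctSpaceB c
    · simp only [bLoop]
      rw [if_pos hc, punctSet_cons_pos rest hc]
      by_cases hmem : PySem.Set.contains seen c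
      · have hcm : c ∈ seen := (PySem.Set.contains_iff seen c).mp hmem
        have hadd : PySem.Set.add seen c = seen := by
          simp [PySem.Set.add, hcm]
        rw [hadd, if_neg (by omega), ih seen hnd hle]
        have hset : seen.toFinset ∪ insert c (punctSet rest)
            = seen.toFinset ∪ punctSet rest := by
          ext x
          simp only [Finset.mem_union, Finset.mem_insert]
          constructor
          · rintro (h | rfl | h)
            · exact Or.inl h
            · exact Or.inl (by simpa using hcm)
            · exact Or.inr h
          · rintro (h | h)
            · exact Or.inl h
            · exact Or.inr (Or.inr h)
        rw [hset]
      · have hcm : c ∉ seen := fun h => hmem ((PySem.Set.contains_iff seen c).mpr h)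
        have hadd : PySem.Set.add seen c = seen ++ [c] := by
          simp [PySem.Set.add, hcm]
        have hndc : (seen ++ [c]).Nodup := by
          rw [List.nodup_append]
          refine ⟨hnd, List.nodup_singleton c, ?_⟩
          intro a ha b hb heq
          have hb' : b = c := List.mem_singleton.mp hb
          subst hb'
          subst heq
          exact hcm ha
        rw [hadd]
        by_cases h2 : 2 ≤ (seen ++ [c]).length
        · rw [if_pos h2]
          have hcard : ((seen ++ [c]).toFinset).card = (seen ++ [c]).length :=
            List.toFinset_card_of_nodup hndc
          have hsub : (seen ++ [c]).toFinset ⊆ seen.toFinset ∪ insert c (punctSet rest) := by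
            intro x hx
            rw [List.toFinset_append] at hx
            rcases Finset.mem_union.mp hx with h | h
            · exact Finset.mem_union_left _ h
            · have hx : x = c := by simpa using h
              subst hx
              exact Finset.mem_union_right _ (Finset.mem_insert_self _ _)
          have hge := Finset.card_le_card hsub
          have hnot : ¬ ((seen.toFinset ∪ insert c (punctSet rest)).card < 2) := by omega
          symm
          rw [decide_eq_false_iff_not]
          exact hnot
        · rw [if_neg h2]
          have hlen : (seen ++ [c]).length ≤ 1 := by omega
          rw [ih (seen ++ [c]) hndc hlen]
          have hset : (seen ++ [c]).toFinset ∪ punctSet rest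
              = seen.toFinset ∪ insert c (punctSet rest) := by
            rw [List.toFinset_append]
            ext x
            simp only [Finset.mem_union, Finset.mem_insert, List.toFinset_cons,
              List.toFinset_nil, insert_empty_eq, Finset.mem_singleton]
            tauto
          rw [hset]
    · simp only [bLoop]
      rw [if_neg hc, punctSet_cons_neg rest hc, ih seen hnd hle]

-- the two counts agree: |{i ∈ P : i ∈ l}| = |distinct chars of l that are in P|
lemma counts_agree (l : List Char) :
    (punctSpaceA.filter (fun i => l.contains i)).length = (punctSet l).card := by
  have hnd : (punctSpaceA.filter (fun i => l.contains i)).Nodup :=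
    punctA_nodup.filter _
  rw [← List.toFinset_card_of_nodup hnd]
  congr 1
  unfold punctSet
  ext x
  simp only [List.mem_toFinset, List.mem_filter, List.contains_iff_mem,
    PySem.Set.contains_iff, punctB_eq]
  exact and_comm

-- ===== VERDICT (by name: the statement is the Claim_ definition above) =====
theorem valid_phrase_spec : Claim_equal_valid_phrase := by
  intro txt _
  unfold Spec_valid_phrase valid_phrase valid_phrase_alt
  rw [bLoop_eq txt.toList PySem.Set.empty (by simp [PySem.Set.empty]) (by simp [PySem.Set.empty])]
  rw [countA]
  rw [counts_agree txt.toList]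
  have hempty : (PySem.Set.empty : PySem.Set Char).toFinset ∪ punctSet txt.toList
      = punctSet txt.toList := by
    simp [PySem.Set.empty]
  rw [hempty]
  by_cases h2 : (punctSet txt.toList).card < 2
  · rw [if_neg (by omega)]
    simp [h2]
  · rw [if_pos (by omega)]
    simp [h2]
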